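-- pv_equiv track=rewrite | github.com/YashIndane/codewars-solutions | python/T.T.T.17:_Split_odd_and_even.py | split_odd_and_even
-- ===== SOURCE A (Python) =====
-- def split_odd_and_even(n):
--     #your code here
--     #o=False
--     #e=False
--     w=[]
--     q=str(n)
--     temp=''
--     for i, j in enumerate(q):
--         if i==0:
--             if int(j)%2==0:
--                 l='e'
--             else:
--                 l='o'
--             temp+=j
--         else:
--             if int(j)%2==0 and l=='e':
--                 temp+=j
--             elif int(j)%2==0 and l=='o':
--                 w.append(temp)
--                 l='e'
--                 temp=j
--             elif int(j)%2==1 and l=='e':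
--                 w.append(temp)
--                 l='o'
--                 temp=j
--             elif int(j)%2==1 and l=='o':
--                 temp+=j
--     w.append(temp)
--     return list(map(int, w))
-- ===== SOURCE B (Python) =====
-- def split_odd_and_even(n):
--     # recursive decomposition: peel off the maximal leading run of same-parity
--     # digits, convert it, and recurse on the remaining suffix
--     def runs(s):
--         if not s:
--             return []
--         p = int(s[0]) % 2
--         k = 1
--         while k < len(s) and int(s[k]) % 2 == p:
--             k += 1
--         return [int(s[:k])] + runs(s[k:])
--     return runs(str(n))
-- ===== Notes on version B (the rewrite author's own statement) =====
-- stated objective: alternative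
-- what changed: Replaced A's single forward loop with 'e'/'o' parity labels, a pending-string accumulator, a four-way branch and a final flush by a recursive decomposition: find the end of the maximal leading same-parity run by index scan, convert that slice to int, and recurse on the remaining suffix.
import Mathlib
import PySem

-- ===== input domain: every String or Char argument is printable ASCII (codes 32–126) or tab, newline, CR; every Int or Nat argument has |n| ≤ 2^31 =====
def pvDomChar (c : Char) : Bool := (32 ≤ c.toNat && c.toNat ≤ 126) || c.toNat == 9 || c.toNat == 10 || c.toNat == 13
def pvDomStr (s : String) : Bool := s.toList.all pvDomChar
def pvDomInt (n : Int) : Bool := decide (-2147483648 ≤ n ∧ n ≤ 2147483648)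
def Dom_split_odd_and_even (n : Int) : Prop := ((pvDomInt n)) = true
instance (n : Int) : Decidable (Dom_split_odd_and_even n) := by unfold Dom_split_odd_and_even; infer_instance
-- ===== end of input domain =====

-- B replaces A's forward parity-label state machine by a recursive decomposition that
-- peels the maximal leading same-parity run (found by index scan) and recurses on the rest.

-- ===== PORT A =====
-- int(j) for a single char; the `none` case (Python's ValueError) is excluded by Pre_
def pvDig (j : Char) : Int := (PySem.Int.ofChars? [j]).getD 0

-- one iteration of A's `for i, j in enumerate(q)` body over the state (w, temp, l)
def pvStepA (st : List (List Char) × List Char × Char) (ij : Int × Char) :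
    List (List Char) × List Char × Char :=
  let w := st.1; let temp := st.2.1; let l := st.2.2
  let i := ij.1; let j := ij.2
  if i = 0 then
    let l' := if PySem.Int.mod (pvDig j) 2 = 0 then 'e' else 'o'
    (w, temp ++ [j], l')
  else if PySem.Int.mod (pvDig j) 2 = 0 ∧ l = 'e' then (w, temp ++ [j], l)
  else if PySem.Int.mod (pvDig j) 2 = 0 ∧ l = 'o' then (w ++ [temp], [j], 'e')
  else if PySem.Int.mod (pvDig j) 2 = 1 ∧ l = 'e' then (w ++ [temp], [j], 'o')
  else if PySem.Int.mod (pvDig j) 2 = 1 ∧ l = 'o' then (w, temp ++ [j], l)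
  else st

def split_odd_and_even (n : Int) : List Int :=
  let q := PySem.Int.toChars n
  -- Python's l is unbound before the loop; ' ' is a placeholder overwritten on the i=0 iteration
  let st := (PySem.List.enumerate q).foldl pvStepA ([], [], ' ')
  let w := st.1 ++ [st.2.1]
  w.map (fun t => (PySem.Int.ofChars? t).getD 0)

-- ===== PORT B =====
-- B's inner `while k < len(s) and int(s[k]) % 2 == p: k += 1`
def pvFindRun (s : List Char) (p : Int) (k : Int) : Int :=
  if _h : k < (s.length : Int) ∧ PySem.Int.mod (pvDig ((PySem.List.pyGet? s k).getD ' ')) 2 = p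
  then pvFindRun s p (k + 1)
  else k
termination_by ((s.length : Int) - k).toNat
decreasing_by omega

-- needed only so pvRuns's recursion (on the suffix s[k:]) is seen to terminate
lemma le_pvFindRun (s : List Char) (p : Int) (k : Int) : k ≤ pvFindRun s p k := by
  induction k using pvFindRun.induct (s := s) (p := p) with
  | case1 k h ih => rw [pvFindRun, dif_pos h]; omega
  | case2 k h => rw [pvFindRun, dif_neg h]

-- B's recursive helper `runs(s)`
def pvRuns (s : List Char) : List Int :=
  if hs : s = [] then []
  else
    let p := PySem.Int.mod (pvDig ((PySem.List.pyGet? s 0).getD ' ')) 2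
    let k := pvFindRun s p 1
    (PySem.Int.ofChars? (PySem.List.slice s none (some k))).getD 0
      :: pvRuns (PySem.List.slice s (some k))
termination_by s.length
decreasing_by
  have h1 := le_pvFindRun s (PySem.Int.mod (pvDig ((PySem.List.pyGet? s 0).getD ' ')) 2) 1
  rw [PySem.List.slice_from s (by omega)]
  have hlen : s.length ≠ 0 := by simpa [List.length_eq_zero_iff] using hs
  simp only [List.length_drop]
  omega

def split_odd_and_even_alt (n : Int) : List Int :=
  pvRuns (PySem.Int.toChars n)

-- ===== PRECONDITION & SPEC =====
-- Pre_ excludes exactly the negative inputs: there str(n) starts with a minus sign and A raises ValueError at int('-') (B raises too).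
def Pre_split_odd_and_even (n : Int) : Prop := 0 ≤ n
instance (n : Int) : Decidable (Pre_split_odd_and_even n) := by unfold Pre_split_odd_and_even; infer_instance
def pvWitness_split_odd_and_even : Int := 80712

def Spec_split_odd_and_even (n : Int) (out : List Int) : Prop := out = split_odd_and_even_alt n
instance (n : Int) (out : List Int) : Decidable (Spec_split_odd_and_even n out) := by unfold Spec_split_odd_and_even; infer_instance

-- ===== CLAIM (what is proved, stated in full; the proofs are below) =====
def Claim_equal_split_odd_and_even : Prop := ∀ (n : Int), Dom_split_odd_and_even n → Pre_split_odd_and_even n → Spec_split_odd_and_even n (split_odd_and_even n)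

-- ===== LEMMAS AND PROOFS =====

-- digit parity, and the list of maximal same-parity runs (the common description both ports compute)
def pvKey (c : Char) : Int := PySem.Int.mod (pvDig c) 2

def pvGroups : List Char → List (List Char)
  | [] => []
  | c :: cs =>
    match pvGroups cs with
    | [] => [[c]]
    | g :: gs => if pvKey c = pvKey (g.headD c) then (c :: g) :: gs else [c] :: g :: gs

lemma pvGroups_ne_nil : ∀ (cs : List Char), ∀ g ∈ pvGroups cs, g ≠ [] := by
  intro cs
  induction cs with
  | nil => simp [pvGroups]
  | cons c cs ih =>
    intro g hg
    rcases hG : pvGroups cs with _ | ⟨g0, gs⟩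
    · simp only [pvGroups, hG, List.mem_singleton] at hg
      simp [hg]
    · have hg0 : g0 ≠ [] := ih g0 (by rw [hG]; exact List.mem_cons_self)
      simp only [pvGroups, hG] at hg
      by_cases hk : pvKey c = pvKey (g0.headD c)
      · rw [if_pos hk] at hg
        rcases List.mem_cons.mp hg with rfl | hmem
        · simp
        · exact ih g (by rw [hG]; exact List.mem_cons_of_mem _ hmem)
      · rw [if_neg hk] at hg
        rcases List.mem_cons.mp hg with rfl | hg2
        · simp
        · rcases List.mem_cons.mp hg2 with rfl | hmem
          · exact hg0
          · exact ih g (by rw [hG]; exact List.mem_cons_of_mem _ hmem)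

def pvGlue (temp : List Char) (l : Char) : List (List Char) → List (List Char)
  | [] => [temp]
  | g :: gs => if pvKey (g.headD ' ') = (if l = 'e' then 0 else 1) then (temp ++ g) :: gs else temp :: g :: gs

lemma pvGlue_cons (temp : List Char) (l l' : Char) (c : Char) (cs : List Char)
    (hl' : (if l' = 'e' then (0 : Int) else 1) = pvKey c) :
    pvGlue temp l (pvGroups (c :: cs)) =
      if pvKey c = (if l = 'e' then (0 : Int) else 1) then pvGlue (temp ++ [c]) l (pvGroups cs)
      else temp :: pvGlue [c] l' (pvGroups cs) := by
  rcases hG : pvGroups cs with _ | ⟨g, gs⟩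
  · by_cases h : pvKey c = (if l = 'e' then (0 : Int) else 1) <;>
      simp [pvGroups, hG, pvGlue, h]
  · have hgne : g ≠ [] := pvGroups_ne_nil cs g (by rw [hG]; exact List.mem_cons_self)
    obtain ⟨a, g', rfl⟩ : ∃ a g', g = a :: g' := by
      cases g with
      | nil => exact absurd rfl hgne
      | cons a g' => exact ⟨a, g', rfl⟩
    by_cases hck : pvKey c = pvKey a <;> by_cases h : pvKey c = (if l = 'e' then (0 : Int) else 1)
    · have ha : pvKey a = (if l = 'e' then (0 : Int) else 1) := hck ▸ h
      simp [pvGroups, hG, pvGlue, hck, ha]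
    · have ha : ¬ pvKey a = (if l = 'e' then (0 : Int) else 1) := fun e => h (hck.trans e)
      have ha' : pvKey a = (if l' = 'e' then (0 : Int) else 1) := (hl'.trans hck).symm
      have hne : ¬ (if l' = 'e' then (0 : Int) else 1) = (if l = 'e' then (0 : Int) else 1) :=
        fun e => ha (ha'.trans e)
      simp [pvGroups, hG, pvGlue, hck, ha', hne]
    · have ha : ¬ pvKey a = (if l = 'e' then (0 : Int) else 1) := fun e => hck (h.trans e.symm)
      have hne2 : ¬ (if l = 'e' then (0 : Int) else 1) = pvKey a := fun e => ha e.symm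
      simp [pvGroups, hG, pvGlue, h, ha, hne2]
    · have ha' : ¬ pvKey a = (if l' = 'e' then (0 : Int) else 1) := fun e => hck (e.trans hl').symm
      simp [pvGroups, hG, pvGlue, hck, h, ha']

lemma pvKey_cases (c : Char) : pvKey c = 0 ∨ pvKey c = 1 := by
  have h0 := PySem.Int.mod_nonneg (pvDig c) (b := 2) (by norm_num)
  have h1 := PySem.Int.mod_lt (pvDig c) (b := 2) (by norm_num)
  unfold pvKey; omega

lemma pvStepA_tail (w : List (List Char)) (temp : List Char) (l : Char) (s : Int) (c : Char)
    (hs : s ≠ 0) (hl : l = 'e' ∨ l = 'o') :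
    pvStepA (w, temp, l) (s, c) =
      if pvKey c = (if l = 'e' then (0 : Int) else 1) then (w, temp ++ [c], l)
      else (w ++ [temp], [c], if pvKey c = 0 then 'e' else 'o') := by
  rcases hl with rfl | rfl <;> rcases pvKey_cases c with hk | hk <;>
    have hkm : pvDig c % 2 = pvKey c :=
      (PySem.Int.mod_eq_emod_of_pos (by norm_num : (0 : Int) < 2)).symm <;>
    simp [pvStepA, hs, hkm, hk]

lemma pvLoop_eq : ∀ (cs : List Char) (s : Int) (w : List (List Char)) (temp : List Char) (l : Char),
    1 ≤ s → (l = 'e' ∨ l = 'o') →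
    ((PySem.List.enumerate cs s).foldl pvStepA (w, temp, l)).1 ++
      [((PySem.List.enumerate cs s).foldl pvStepA (w, temp, l)).2.1] =
      w ++ pvGlue temp l (pvGroups cs) := by
  intro cs
  induction cs with
  | nil => intro s w temp l _ _; simp [PySem.List.enumerate_nil, pvGlue, pvGroups]
  | cons c cs ih =>
    intro s w temp l hs hl
    rw [PySem.List.enumerate_cons]
    simp only [List.foldl_cons]
    have hl'2 : (if (if pvKey c = 0 then 'e' else 'o') = 'e' then (0 : Int) else 1) = pvKey c := by
      rcases pvKey_cases c with hk | hk <;> simp [hk]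
    rw [pvStepA_tail w temp l s c (by omega) hl]
    by_cases h : pvKey c = (if l = 'e' then (0 : Int) else 1)
    · rw [if_pos h, ih (s + 1) w (temp ++ [c]) l (by omega) hl,
        pvGlue_cons temp l (if pvKey c = 0 then 'e' else 'o') c cs hl'2, if_pos h]
    · rw [if_neg h, ih (s + 1) (w ++ [temp]) [c] (if pvKey c = 0 then 'e' else 'o') (by omega)
          (by rcases pvKey_cases c with hk | hk <;> simp [hk]),
        pvGlue_cons temp l (if pvKey c = 0 then 'e' else 'o') c cs hl'2, if_neg h]
      simp

lemma toDigitsCore_len_le (b : Nat) : ∀ (fuel n : Nat) (acc : List Char),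
    acc.length ≤ (Nat.toDigitsCore b fuel n acc).length := by
  intro fuel
  induction fuel with
  | zero => intro n acc; simp [Nat.toDigitsCore]
  | succ fuel ih =>
    intro n acc
    simp only [Nat.toDigitsCore]
    split
    · simp
    · exact le_trans (by simp) (ih (n / b) _)

lemma toDigits_ne_nil (b n : Nat) : Nat.toDigits b n ≠ [] := by
  have h : (0 : Nat) < (Nat.toDigits b n).length := by
    unfold Nat.toDigits
    simp only [Nat.toDigitsCore]
    split
    · simp
    · exact lt_of_lt_of_le (by simp) (toDigitsCore_len_le b n _ _)
  exact fun e => by simp [e] at h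

lemma pvFirst_glue (c : Char) (cs : List Char) (l : Char)
    (hl : (if l = 'e' then (0 : Int) else 1) = pvKey c) :
    pvGlue [c] l (pvGroups cs) = pvGroups (c :: cs) := by
  rcases hG : pvGroups cs with _ | ⟨g, gs⟩
  · simp [pvGroups, hG, pvGlue]
  · have hgne : g ≠ [] := pvGroups_ne_nil cs g (by rw [hG]; exact List.mem_cons_self)
    obtain ⟨a, g', rfl⟩ : ∃ a g', g = a :: g' := by
      cases g with
      | nil => exact absurd rfl hgne
      | cons a g' => exact ⟨a, g', rfl⟩
    by_cases hck : pvKey c = pvKey a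
    · have ha : pvKey a = (if l = 'e' then (0 : Int) else 1) := (hl.trans hck).symm
      simp [pvGroups, hG, pvGlue, hck, ha]
    · have ha : ¬ pvKey a = (if l = 'e' then (0 : Int) else 1) := fun e => hck ((e.trans hl).symm)
      simp [pvGroups, hG, pvGlue, hck, ha]

lemma pvMachine_eq_groups (q : List Char) (hq : q ≠ []) :
    ((PySem.List.enumerate q).foldl pvStepA ([], [], ' ')).1 ++
      [((PySem.List.enumerate q).foldl pvStepA ([], [], ' ')).2.1] = pvGroups q := by
  rcases q with _ | ⟨c, cs⟩
  · exact absurd rfl hq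
  · rw [PySem.List.enumerate_cons, List.foldl_cons]
    have hkm : pvDig c % 2 = pvKey c :=
      (PySem.Int.mod_eq_emod_of_pos (by norm_num : (0 : Int) < 2)).symm
    have h0 : pvStepA ([], [], ' ') ((0 : Int), c) = ([], [c], if pvKey c = 0 then 'e' else 'o') := by
      rcases pvKey_cases c with hk | hk <;> simp [pvStepA, hkm, hk]
    rw [h0, pvLoop_eq cs (0 + 1) [] [c] _ (by norm_num)
      (by rcases pvKey_cases c with hk | hk <;> simp [hk])]
    rw [List.nil_append, pvFirst_glue c cs _
      (by rcases pvKey_cases c with hk | hk <;> simp [hk])]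

-- ===== B-side lemmas =====

-- the index scan finds exactly the takeWhile length of the suffix
lemma pvFindRun_spec (s : List Char) (p : Int) (k : Int) (hk : 0 ≤ k) :
    pvFindRun s p k = k + ((s.drop k.toNat).takeWhile (fun x => decide (pvKey x = p))).length := by
  induction k using pvFindRun.induct (s := s) (p := p) with
  | case1 k h ih =>
    obtain ⟨hlt, hkey⟩ := h
    have hklen : k.toNat < s.length := by omega
    have hget : PySem.List.pyGet? s k = some s[k.toNat] :=
      PySem.List.pyGet?_eq_some_getElem s hk (by omega)
    rw [pvFindRun, dif_pos ⟨hlt, hkey⟩, ih (by omega)]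
    rw [List.drop_eq_getElem_cons hklen, List.takeWhile_cons]
    have : pvKey s[k.toNat] = p := by
      unfold pvKey; rw [hget] at hkey; simpa using hkey
    simp only [this, decide_true, if_pos]
    have h1 : (k + 1).toNat = k.toNat + 1 := by omega
    simp [h1]; omega
  | case2 k h =>
    rw [pvFindRun, dif_neg h]
    by_cases hlt : k < (s.length : Int)
    · have hklen : k.toNat < s.length := by omega
      have hget : PySem.List.pyGet? s k = some s[k.toNat] :=
        PySem.List.pyGet?_eq_some_getElem s hk (by omega)
      have hkey : ¬ pvKey s[k.toNat] = p := by
        intro he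
        exact h ⟨hlt, by unfold pvKey at he; rw [hget]; simpa using he⟩
      rw [List.drop_eq_getElem_cons hklen, List.takeWhile_cons]
      simp [hkey]
    · have hle : s.length ≤ k.toNat := by omega
      simp [List.drop_eq_nil_of_le hle]

-- pvGroups on a cons whose tail's groups are known
lemma pvGroups_cons_eq (c : Char) (cs : List Char) (g : List Char) (gs : List (List Char))
    (h : pvGroups cs = g :: gs) :
    pvGroups (c :: cs) = if pvKey c = pvKey (g.headD c) then (c :: g) :: gs else [c] :: g :: gs := by
  simp [pvGroups, h]

-- pvGroups peels the maximal leading run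
lemma pvGroups_chunk : ∀ (cs : List Char) (c : Char),
    pvGroups (c :: cs) =
      (c :: cs.takeWhile (fun x => decide (pvKey x = pvKey c)))
        :: pvGroups (cs.dropWhile (fun x => decide (pvKey x = pvKey c))) := by
  intro cs
  induction cs with
  | nil => intro c; simp [pvGroups]
  | cons d ds ih =>
    intro c
    by_cases hdc : pvKey d = pvKey c
    · have hpred : (fun x => decide (pvKey x = pvKey d)) = (fun x => decide (pvKey x = pvKey c)) := by
        funext x; simp [hdc]
      have hd := ih d
      rw [hpred] at hd
      rw [pvGroups_cons_eq c (d :: ds) _ _ hd]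
      rw [if_pos (by simpa using hdc.symm)]
      simp [List.dropWhile_cons, hdc]
    · have hd := ih d
      rw [pvGroups_cons_eq c (d :: ds) _ _ hd]
      rw [if_neg (by simp only [List.headD_cons]; exact fun e => hdc e.symm)]
      rw [← hd]
      simp [List.dropWhile_cons, hdc]

-- unfolding of pvRuns on a nonempty list, with the scan start expressed through pvKey
lemma pvRuns_cons (c : Char) (cs : List Char) :
    pvRuns (c :: cs) =
      (PySem.Int.ofChars? (PySem.List.slice (c :: cs) none (some (pvFindRun (c :: cs) (pvKey c) 1)))).getD 0
        :: pvRuns (PySem.List.slice (c :: cs) (some (pvFindRun (c :: cs) (pvKey c) 1))) := by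
  rw [pvRuns, dif_neg (by simp : ¬ (c :: cs) = [])]
  simp [pvKey]

-- B computes the runs mapped to ints
lemma pvRuns_eq_groups : ∀ (s : List Char),
    pvRuns s = (pvGroups s).map (fun g => (PySem.Int.ofChars? g).getD 0) := by
  intro s
  induction s using pvRuns.induct with
  | case1 => simp [pvRuns, pvGroups]
  | case2 s hs p k ih =>
    obtain ⟨c, cs, rfl⟩ : ∃ c cs, s = c :: cs := by
      cases s with
      | nil => exact absurd rfl hs
      | cons c cs => exact ⟨c, cs, rfl⟩
    have hE : PySem.Int.mod (pvDig ((PySem.List.pyGet? (c :: cs) 0).getD ' ')) 2 = pvKey c := by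
      rw [PySem.List.pyGet?_zero_cons]; rfl
    simp only [k, p, hE] at ih
    rw [pvRuns_cons c cs]
    have hk1 : (1 : Int) ≤ pvFindRun (c :: cs) (pvKey c) 1 := le_pvFindRun _ _ _
    have hkval : pvFindRun (c :: cs) (pvKey c) 1 =
        1 + ((cs.takeWhile (fun x => decide (pvKey x = pvKey c))).length : Int) := by
      rw [pvFindRun_spec _ _ _ (by norm_num)]
      norm_num
    have hnat : (pvFindRun (c :: cs) (pvKey c) 1).toNat =
        1 + (cs.takeWhile (fun x => decide (pvKey x = pvKey c))).length := by omega
    have htake : (c :: cs).take (pvFindRun (c :: cs) (pvKey c) 1).toNat =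
        c :: cs.takeWhile (fun x => decide (pvKey x = pvKey c)) := by
      rw [hnat, Nat.add_comm, List.take_succ_cons]
      congr 1
      have h := List.take_left (l₁ := cs.takeWhile (fun x => decide (pvKey x = pvKey c)))
        (l₂ := cs.dropWhile (fun x => decide (pvKey x = pvKey c)))
      rwa [List.takeWhile_append_dropWhile] at h
    have hdrop : (c :: cs).drop (pvFindRun (c :: cs) (pvKey c) 1).toNat =
        cs.dropWhile (fun x => decide (pvKey x = pvKey c)) := by
      rw [hnat, Nat.add_comm, List.drop_succ_cons]
      have h := List.drop_left (l₁ := cs.takeWhile (fun x => decide (pvKey x = pvKey c)))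
        (l₂ := cs.dropWhile (fun x => decide (pvKey x = pvKey c)))
      rwa [List.takeWhile_append_dropWhile] at h
    rw [PySem.List.slice_to _ (by omega : (0:Int) ≤ pvFindRun (c :: cs) (pvKey c) 1), PySem.List.slice_from _ (by omega : (0:Int) ≤ pvFindRun (c :: cs) (pvKey c) 1), htake, hdrop]
    rw [pvGroups_chunk cs c, List.map_cons]
    congr 1
    rw [PySem.List.slice_from _ (by omega : (0:Int) ≤ pvFindRun (c :: cs) (pvKey c) 1), hdrop] at ih
    exact ih

-- ===== VERDICT (by name: the statement is the Claim_ definition above) =====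
theorem split_odd_and_even_spec : Claim_equal_split_odd_and_even := by
  intro n _ hn
  have hn' : 0 ≤ n := hn
  have hne : PySem.Int.toChars n ≠ [] := by
    unfold PySem.Int.toChars
    rw [if_neg (by omega : ¬ n < 0)]
    exact toDigits_ne_nil 10 n.toNat
  unfold Spec_split_odd_and_even
  simp only [split_odd_and_even, split_odd_and_even_alt]
  rw [pvMachine_eq_groups _ hne, pvRuns_eq_groups]
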